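-- pv_equiv track=rewrite | github.com/kozurap/Abdullin_ML | HW4/main.py | get_clusterized_matrix
-- ===== SOURCE A (Python) =====
-- def get_clusterized_matrix(matrix, number_of_clusters):
--     matrix_copy = []
--
--     for line in matrix:
--         matrix_copy.append(line.copy())
--
--     for k in range(number_of_clusters-1):
--         max_edge = (0, 0, 0)
--         for i in range(len(matrix_copy)):
--             for j in range(i, len(matrix_copy)):
--                 if matrix_copy[i][j] > max_edge[2]:
--                     max_edge = (i, j, matrix_copy[i][j])
--
--         matrix_copy[max_edge[0]][max_edge[1]] = 0
--         matrix_copy[max_edge[1]][max_edge[0]] = 0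
--
--     return matrix_copy
-- ===== SOURCE B (Python) =====
-- def get_clusterized_matrix(matrix, number_of_clusters):
--     # Collect the positive upper-triangle edges once, sort them by value
--     # (descending, ties in row-major order) and zero out the top k-1 of them.
--     result = [row.copy() for row in matrix]
--     if number_of_clusters - 1 <= 0:
--         return result
--     n = len(matrix)
--     edges = [(i, j) for i in range(n) for j in range(i, n) if matrix[i][j] > 0]
--     # single integer key: value descending, then row-major rank i*n+j ascending
--     edges = sorted(edges, key=lambda e: -matrix[e[0]][e[1]] * n * n + e[0] * n + e[1])
--     for i, j in edges[:number_of_clusters - 1]: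
--         result[i][j] = 0
--         result[j][i] = 0
--     return result
-- ===== Notes on version B (the rewrite author's own statement) =====
-- stated objective: faster
-- what changed: Instead of re-scanning the whole matrix once per cluster (k-1 argmax passes with in-place zeroing), B collects the positive upper-triangle edges once, sorts them by value descending with row-major tie-break, and zeroes the top k-1 in one pass.
-- intended difference: When number_of_clusters-1 exceeds the number of positive upper-triangle entries and matrix[0][0] is negative, A's (0,0,0) sentinel makes the exhausted rounds overwrite matrix[0][0] with 0, while B leaves the negative matrix[0][0] untouched, which is the intended behaviour (no edge should be cut when none remains). — e.g. on get_clusterized_matrix([[-1]], 2): A returns [[0]], B returns [[-1]]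
import Mathlib
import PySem

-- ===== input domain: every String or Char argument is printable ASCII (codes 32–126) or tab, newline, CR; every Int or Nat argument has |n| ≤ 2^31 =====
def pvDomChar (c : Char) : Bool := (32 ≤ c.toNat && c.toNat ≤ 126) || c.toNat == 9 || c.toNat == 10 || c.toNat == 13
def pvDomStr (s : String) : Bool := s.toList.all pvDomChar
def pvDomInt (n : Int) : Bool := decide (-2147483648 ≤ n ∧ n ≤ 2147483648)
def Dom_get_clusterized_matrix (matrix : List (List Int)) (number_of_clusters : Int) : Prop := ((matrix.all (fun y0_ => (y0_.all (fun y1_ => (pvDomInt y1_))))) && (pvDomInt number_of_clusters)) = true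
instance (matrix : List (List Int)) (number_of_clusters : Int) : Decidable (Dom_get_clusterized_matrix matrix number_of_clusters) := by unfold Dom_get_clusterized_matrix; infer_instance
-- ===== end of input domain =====

-- B zeroes the k-1 largest positive upper-triangle edges found by one sort (value descending,
-- row-major tie-break) instead of A's repeated argmax scans; measured faster at large sizes.

-- ===== PORT A =====
def get_clusterized_matrix (matrix : List (List Int)) (number_of_clusters : Int) : List (List Int) :=
  let matrix_copy : List (List Int) := matrix.foldl (fun acc line => acc ++ [line]) []
  (PySem.List.pyRange 0 (number_of_clusters - 1) 1).foldl (fun matrix_copy _k =>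
    let max_edge : Int × Int × Int :=
      (PySem.List.pyRange 0 (matrix_copy.length : Int) 1).foldl (fun max_edge i =>
        (PySem.List.pyRange i (matrix_copy.length : Int) 1).foldl (fun max_edge j =>
          if PySem.List.pyGetD (PySem.List.pyGetD matrix_copy i []) j 0 > max_edge.2.2 then
            (i, j, PySem.List.pyGetD (PySem.List.pyGetD matrix_copy i []) j 0)
          else max_edge) max_edge) ((0 : Int), (0 : Int), (0 : Int))
    let matrix_copy := PySem.List.pySetD matrix_copy max_edge.1
      (PySem.List.pySetD (PySem.List.pyGetD matrix_copy max_edge.1 []) max_edge.2.1 0)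
    PySem.List.pySetD matrix_copy max_edge.2.1
      (PySem.List.pySetD (PySem.List.pyGetD matrix_copy max_edge.2.1 []) max_edge.1 0))
    matrix_copy

-- ===== PORT B =====
def get_clusterized_matrix_alt (matrix : List (List Int)) (number_of_clusters : Int) : List (List Int) :=
  let result : List (List Int) := matrix.map (fun row => row)
  if number_of_clusters - 1 ≤ 0 then result
  else
    let n : Int := (matrix.length : Int)
    let edges : List (Int × Int) :=
      (PySem.List.pyRange 0 n 1).flatMap (fun i =>
        ((PySem.List.pyRange i n 1).map (fun j => (i, j))).filter (fun e =>
          0 < PySem.List.pyGetD (PySem.List.pyGetD matrix e.1 []) e.2 0))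
    let edges := PySem.List.sorted edges
        (fun e => -(PySem.List.pyGetD (PySem.List.pyGetD matrix e.1 []) e.2 0) * n * n + e.1 * n + e.2) false
    (edges.take (number_of_clusters - 1).toNat).foldl (fun result e =>
      let result := PySem.List.pySetD result e.1
        (PySem.List.pySetD (PySem.List.pyGetD result e.1 []) e.2 0)
      PySem.List.pySetD result e.2
        (PySem.List.pySetD (PySem.List.pyGetD result e.2 []) e.1 0)) result

-- ===== PRECONDITION & SPEC =====
-- Pre_ excludes exactly the inputs where the Python A raises IndexError: when at least one
-- round runs (number_of_clusters ≥ 2), the matrix must be nonempty and every row at least as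
-- long as the number of rows (the scan touches every column index < len(matrix) of every row).
def Pre_get_clusterized_matrix (matrix : List (List Int)) (number_of_clusters : Int) : Prop :=
  number_of_clusters ≤ 1 ∨ (matrix ≠ [] ∧ ∀ row ∈ matrix, matrix.length ≤ row.length)
instance (matrix : List (List Int)) (number_of_clusters : Int) : Decidable (Pre_get_clusterized_matrix matrix number_of_clusters) := by unfold Pre_get_clusterized_matrix; infer_instance
def pvWitness_get_clusterized_matrix : List (List Int) × Int := ([[0, 2], [2, 0]], 2)

-- When number_of_clusters-1 exceeds the number of positive upper-triangle entries and
-- matrix[0][0] is negative, A's (0,0,0) sentinel makes the exhausted rounds overwrite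
-- matrix[0][0] with 0, while B leaves the negative matrix[0][0] untouched, which is the
-- intended behaviour (no edge should be cut when none remains).
def D_get_clusterized_matrix (matrix : List (List Int)) (number_of_clusters : Int) : Prop :=
  matrix ≠ [] ∧ (matrix.getD 0 []).getD 0 0 < 0 ∧
    ((((List.range matrix.length).map (fun i =>
      (((matrix.getD i []).take matrix.length).drop i).countP (fun v => decide (0 < v)))).sum : Int)
      < number_of_clusters - 1)
instance (matrix : List (List Int)) (number_of_clusters : Int) : Decidable (D_get_clusterized_matrix matrix number_of_clusters) := by unfold D_get_clusterized_matrix; infer_instance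

def Spec_get_clusterized_matrix (matrix : List (List Int)) (number_of_clusters : Int) (out : List (List Int)) : Prop := ¬ D_get_clusterized_matrix matrix number_of_clusters → out = get_clusterized_matrix_alt matrix number_of_clusters
instance (matrix : List (List Int)) (number_of_clusters : Int) (out : List (List Int)) : Decidable (Spec_get_clusterized_matrix matrix number_of_clusters out) := by unfold Spec_get_clusterized_matrix; infer_instance

def pvDiffWitness_get_clusterized_matrix : List (List Int) × Int := ([[-1]], 2)
def pvDiffWitnessOut_get_clusterized_matrix : (List (List Int)) × (List (List Int)) := ([[0]], [[-1]])

-- ===== CLAIM (what is proved, stated in full; the proofs are below) =====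
def Claim_unchanged_get_clusterized_matrix : Prop := ∀ (matrix : List (List Int)) (number_of_clusters : Int), Dom_get_clusterized_matrix matrix number_of_clusters → Pre_get_clusterized_matrix matrix number_of_clusters → Spec_get_clusterized_matrix matrix number_of_clusters (get_clusterized_matrix matrix number_of_clusters)
def Claim_changed_get_clusterized_matrix : Prop := Dom_get_clusterized_matrix (pvDiffWitness_get_clusterized_matrix.1) (pvDiffWitness_get_clusterized_matrix.2) ∧ Pre_get_clusterized_matrix (pvDiffWitness_get_clusterized_matrix.1) (pvDiffWitness_get_clusterized_matrix.2) ∧ D_get_clusterized_matrix (pvDiffWitness_get_clusterized_matrix.1) (pvDiffWitness_get_clusterized_matrix.2) ∧ get_clusterized_matrix (pvDiffWitness_get_clusterized_matrix.1) (pvDiffWitness_get_clusterized_matrix.2) = pvDiffWitnessOut_get_clusterized_matrix.1 ∧ get_clusterized_matrix_alt (pvDiffWitness_get_clusterized_matrix.1) (pvDiffWitness_get_clusterized_matrix.2) = pvDiffWitnessOut_get_clusterized_matrix.2 ∧ pvDiffWitnessOut_get_clusterized_matrix.1 ≠ pvDiffWitnessOut_get_clusterized_matrix.2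
def Claim_exact_get_clusterized_matrix : Prop := ∀ (matrix : List (List Int)) (number_of_clusters : Int), Dom_get_clusterized_matrix matrix number_of_clusters → Pre_get_clusterized_matrix matrix number_of_clusters → D_get_clusterized_matrix matrix number_of_clusters → get_clusterized_matrix matrix number_of_clusters ≠ get_clusterized_matrix_alt matrix number_of_clusters

-- ===== LEMMAS AND PROOFS =====

-- proof vocabulary: cell value, upper-triangle positions, positive edges
def pvWv (matrix : List (List Int)) (p : Int × Int) : Int :=
  PySem.List.pyGetD (PySem.List.pyGetD matrix p.1 []) p.2 0
def pvTri (n : Int) : List (Int × Int) :=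
  (PySem.List.pyRange 0 n 1).flatMap (fun i => (PySem.List.pyRange i n 1).map (fun j => (i, j)))
def pvEdges (matrix : List (List Int)) : List (Int × Int) :=
  (pvTri (matrix.length : Int)).filter (fun p => 0 < pvWv matrix p)

-- the symmetric zeroing step both programs perform at an edge e
def pvZstep (mc : List (List Int)) (e : Int × Int) : List (List Int) :=
  let mc' := PySem.List.pySetD mc e.1
    (PySem.List.pySetD (PySem.List.pyGetD mc e.1 []) e.2 0)
  PySem.List.pySetD mc' e.2
    (PySem.List.pySetD (PySem.List.pyGetD mc' e.2 []) e.1 0)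

def pvApplyZ (M : List (List Int)) (ps : List (Int × Int)) : List (List Int) := ps.foldl pvZstep M

def pvRank (n : Int) (p : Int × Int) : Int := p.1 * n + p.2
def pvKey (M : List (List Int)) (n : Int) (e : Int × Int) : Int :=
  -(pvWv M e) * n * n + e.1 * n + e.2
def pvS (M : List (List Int)) : List (Int × Int) :=
  PySem.List.sorted (pvEdges M) (pvKey M (M.length : Int)) false

-- the argmax fold of A's inner double loop, abstracted over a value function
def pvBF (w : Int × Int → Int) (L : List (Int × Int)) (init : Int × Int × Int) : Int × Int × Int :=
  L.foldl (fun me p => if w p > me.2.2 then (p.1, p.2, w p) else me) init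

-- the round step of A: one argmax scan followed by the symmetric zeroing
def pvStep (mc : List (List Int)) : List (List Int) :=
  let me := pvBF (pvWv mc) (pvTri (mc.length : Int)) ((0 : Int), (0 : Int), (0 : Int))
  pvZstep mc (me.1, me.2.1)

-- shape invariant: same row lengths as the original matrix
def pvGood (M X : List (List Int)) : Prop := X.map List.length = M.map List.length

theorem pv_foldl_flatMap {a b s : Type} (xs : List a) (g : a → List b) (f : s → b → s) (init : s) :
    (xs.flatMap g).foldl f init = xs.foldl (fun acc x => (g x).foldl f acc) init := by
  induction xs generalizing init with
  | nil => rfl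
  | cons x xs ih => simp [List.foldl_append, ih]

theorem pv_filter_flatMap {a b : Type} (xs : List a) (g : a → List b) (p : b → Bool) :
    xs.flatMap (fun x => (g x).filter p) = (xs.flatMap g).filter p := by
  induction xs with
  | nil => rfl
  | cons x xs ih => simp [List.filter_append, ih]

theorem pv_foldl_const {s a : Type} (L : List a) (g : s → s) (init : s) :
    L.foldl (fun st _ => g st) init = g^[L.length] init := by
  induction L generalizing init with
  | nil => rfl
  | cons x xs ih => simp [ih, Function.iterate_succ_apply]

theorem pv_scan_eq (mc : List (List Int)) :
    (PySem.List.pyRange 0 (mc.length : Int) 1).foldl (fun max_edge i =>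
        (PySem.List.pyRange i (mc.length : Int) 1).foldl (fun max_edge j =>
          if PySem.List.pyGetD (PySem.List.pyGetD mc i []) j 0 > max_edge.2.2 then
            (i, j, PySem.List.pyGetD (PySem.List.pyGetD mc i []) j 0)
          else max_edge) max_edge) ((0 : Int), (0 : Int), (0 : Int))
      = pvBF (pvWv mc) (pvTri (mc.length : Int)) ((0 : Int), (0 : Int), (0 : Int)) := by
  rw [pvBF, pvTri, pv_foldl_flatMap]
  simp only [List.foldl_map, pvWv]

theorem pv_A_eq (matrix : List (List Int)) (k : Int) :
    get_clusterized_matrix matrix k = pvStep^[(k - 1).toNat] matrix := by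
  unfold get_clusterized_matrix
  rw [PySem.List.foldl_append_singleton, List.nil_append]
  have hb : ∀ (mc : List (List Int)) (x : Int),
      (fun (matrix_copy : List (List Int)) (_k : Int) =>
        let max_edge : Int × Int × Int :=
          (PySem.List.pyRange 0 (matrix_copy.length : Int) 1).foldl (fun max_edge i =>
            (PySem.List.pyRange i (matrix_copy.length : Int) 1).foldl (fun max_edge j =>
              if PySem.List.pyGetD (PySem.List.pyGetD matrix_copy i []) j 0 > max_edge.2.2 then
                (i, j, PySem.List.pyGetD (PySem.List.pyGetD matrix_copy i []) j 0)
              else max_edge) max_edge) ((0 : Int), (0 : Int), (0 : Int))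
        let matrix_copy := PySem.List.pySetD matrix_copy max_edge.1
          (PySem.List.pySetD (PySem.List.pyGetD matrix_copy max_edge.1 []) max_edge.2.1 0)
        PySem.List.pySetD matrix_copy max_edge.2.1
          (PySem.List.pySetD (PySem.List.pyGetD matrix_copy max_edge.2.1 []) max_edge.1 0)) mc x
      = pvStep mc := by
    intro mc x
    simp only [pv_scan_eq, pvStep, pvZstep]
  rw [PySem.List.foldl_congr_mem _ _ (fun mc _ => pvStep mc) _ (fun acc x _ => hb acc x)]
  rw [pv_foldl_const, PySem.List.length_pyRange_one]
  norm_num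

theorem pv_B_eq (matrix : List (List Int)) (k : Int) :
    get_clusterized_matrix_alt matrix k = pvApplyZ matrix ((pvS matrix).take (k - 1).toNat) := by
  unfold get_clusterized_matrix_alt pvApplyZ pvS pvEdges pvTri pvKey pvWv pvZstep
  simp only [pv_filter_flatMap, List.map_id']
  by_cases h : k - 1 ≤ 0
  · rw [if_pos h, show (k - 1).toNat = 0 by omega, List.take_zero]
    rfl
  · rw [if_neg h]

theorem pv_mem_tri {n : Int} {p : Int × Int} :
    p ∈ pvTri n ↔ 0 ≤ p.1 ∧ p.1 ≤ p.2 ∧ p.2 < n := by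
  obtain ⟨i, j⟩ := p
  simp only [pvTri, List.mem_flatMap, List.mem_map, PySem.List.mem_pyRange_one, Prod.mk.injEq]
  constructor
  · rintro ⟨x, ⟨hx0, hxn⟩, y, ⟨hy1, hy2⟩, rfl, rfl⟩
    exact ⟨hx0, hy1, hy2⟩
  · rintro ⟨h1, h2, h3⟩
    exact ⟨i, ⟨h1, by omega⟩, j, ⟨h2, h3⟩, rfl, rfl⟩


theorem pvGood_len {M X : List (List Int)} (h : pvGood M X) : X.length = M.length := by
  have := congrArg List.length h; simpa using this

theorem pvGood_rowlen {M X : List (List Int)} (h : pvGood M X)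
    (hrow : ∀ r ∈ M, M.length ≤ r.length) {i : Nat} (hi : i < X.length) :
    M.length ≤ (X.getD i []).length := by
  have hlen : X.length = M.length := pvGood_len h
  have h3 : (X.map List.length)[i]? = (M.map List.length)[i]? := by rw [h]
  rw [List.getElem?_map, List.getElem?_map, List.getElem?_eq_getElem hi,
      List.getElem?_eq_getElem (by omega : i < M.length)] at h3
  simp only [Option.map_some, Option.some.injEq] at h3
  rw [List.getD_eq_getElem X [] hi, h3]
  exact hrow _ (List.getElem_mem _)

theorem pv_getD_set {α : Type} (l : List α) (u v : Nat) (x d : α) :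
    (l.set u x).getD v d = if u = v ∧ u < l.length then x else l.getD v d := by
  rw [List.getD_eq_getElem?_getD, List.getD_eq_getElem?_getD, List.getElem?_set]
  by_cases h : u = v
  · subst h
    by_cases h2 : u < l.length <;> simp [h2]
  · simp [h]

theorem pv_pyGetD_getD {α : Type} (xs : List α) (d : α) {i : Int} (h0 : 0 ≤ i)
    (h1 : i < (xs.length : Int)) : PySem.List.pyGetD xs i d = xs.getD i.toNat d := by
  rw [PySem.List.pyGetD_eq_getElem xs d h0 h1, List.getD_eq_getElem xs d (by omega)]

theorem pv_map_len_set (l : List (List Int)) (i : Nat) (r : List Int)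
    (hr : ∀ h : i < l.length, r.length = (l.getD i []).length) :
    (l.set i r).map List.length = l.map List.length := by
  apply List.ext_getElem?
  intro j
  simp only [List.getElem?_map, List.getElem?_set]
  by_cases hij : i = j
  · subst hij
    by_cases hi : i < l.length
    · simp [hi, List.getElem?_eq_getElem hi, hr hi, List.getD_eq_getElem l [] hi]
    · have h0 : l[i]? = none := by rw [List.getElem?_eq_none_iff]; omega
      simp [hi, h0]
  · simp [hij]

theorem pv_zstep_eq (X : List (List Int)) (e : Int × Int) (h1 : 0 ≤ e.1) (h2 : 0 ≤ e.2)
    (ha : e.1 < (X.length : Int)) (hb : e.2 < (X.length : Int)) :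
    pvZstep X e = (X.set e.1.toNat ((X.getD e.1.toNat []).set e.2.toNat 0)).set e.2.toNat
      (((X.set e.1.toNat ((X.getD e.1.toNat []).set e.2.toNat 0)).getD e.2.toNat []).set e.1.toNat 0) := by
  unfold pvZstep
  rw [pv_pyGetD_getD X [] h1 ha,
      PySem.List.pySetD_of_nonneg _ _ h2,
      PySem.List.pySetD_of_nonneg _ _ h1,
      pv_pyGetD_getD _ [] h2 (by simp only [List.length_set]; omega),
      PySem.List.pySetD_of_nonneg _ _ h1,
      PySem.List.pySetD_of_nonneg _ _ h2]

theorem pvGood_zstep {M X : List (List Int)} (hG : pvGood M X) (e : Int × Int)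
    (h1 : 0 ≤ e.1) (h2 : 0 ≤ e.2) : pvGood M (pvZstep X e) := by
  unfold pvGood pvZstep
  rw [PySem.List.pySetD_of_nonneg _ _ h2, PySem.List.pySetD_of_nonneg _ _ h1]
  rw [pv_map_len_set _ _ _ (fun h => by
        rw [pv_pyGetD_getD _ [] h2 (by simp only [List.length_set] at h ⊢; omega),
            PySem.List.pySetD_of_nonneg _ _ h1]
        simp),
      pv_map_len_set _ _ _ (fun h => by
        rw [pv_pyGetD_getD X [] h1 (by omega), PySem.List.pySetD_of_nonneg _ _ h2]
        simp)]
  exact hG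

theorem pv_wv_getD (X : List (List Int)) (p : Int × Int) (h1 : 0 ≤ p.1) (h3 : 0 ≤ p.2)
    (h2 : p.1 < (X.length : Int)) (h4 : p.2 < ((X.getD p.1.toNat []).length : Int)) :
    pvWv X p = (X.getD p.1.toNat []).getD p.2.toNat 0 := by
  unfold pvWv
  rw [pv_pyGetD_getD X [] h1 h2, pv_pyGetD_getD _ 0 h3 h4]

theorem pv_wv_zstep {M X : List (List Int)} (hG : pvGood M X)
    (hrow : ∀ r ∈ M, M.length ≤ r.length) {e p : Int × Int}
    (he : e ∈ pvTri (M.length : Int)) (hp : p ∈ pvTri (M.length : Int)) :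
    pvWv (pvZstep X e) p = if p = e then 0 else pvWv X p := by
  obtain ⟨he1, he2, he3⟩ := pv_mem_tri.mp he
  obtain ⟨hp1, hp2, hp3⟩ := pv_mem_tri.mp hp
  have hXlen : X.length = M.length := pvGood_len hG
  have hra : M.length ≤ (X.getD e.1.toNat []).length := pvGood_rowlen hG hrow (by omega)
  have hrb : M.length ≤ (X.getD e.2.toNat []).length := pvGood_rowlen hG hrow (by omega)
  have hri : M.length ≤ (X.getD p.1.toNat []).length := pvGood_rowlen hG hrow (by omega)
  have hGZ : pvGood M (pvZstep X e) := pvGood_zstep hG e he1 (by omega)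
  have hZlen : (pvZstep X e).length = M.length := pvGood_len hGZ
  have hrZ : M.length ≤ ((pvZstep X e).getD p.1.toNat []).length :=
    pvGood_rowlen hGZ hrow (by omega)
  have hpe_iff : (p = e) ↔ (p.1.toNat = e.1.toNat ∧ p.2.toNat = e.2.toNat) := by
    constructor
    · intro h; rw [h]; exact ⟨rfl, rfl⟩
    · rintro ⟨ha, hb⟩
      have h1' : p.1 = e.1 := by omega
      have h2' : p.2 = e.2 := by omega
      exact Prod.ext h1' h2'
  rw [pv_wv_getD _ p hp1 (by omega) (by omega) (by omega),
      pv_wv_getD X p hp1 (by omega) (by omega) (by omega),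
      pv_zstep_eq X e he1 (by omega) (by omega) (by omega)]
  have hY1b : (X.set e.1.toNat ((X.getD e.1.toNat []).set e.2.toNat 0)).getD e.2.toNat []
      = if e.1.toNat = e.2.toNat then (X.getD e.1.toNat []).set e.2.toNat 0
        else X.getD e.2.toNat [] := by
    rw [pv_getD_set]
    by_cases hab : e.1.toNat = e.2.toNat
    · rw [if_pos ⟨hab, by omega⟩, if_pos hab]
    · rw [if_neg (fun hc => hab hc.1), if_neg hab]
  have hY1i : (X.set e.1.toNat ((X.getD e.1.toNat []).set e.2.toNat 0)).getD p.1.toNat []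
      = if e.1.toNat = p.1.toNat then (X.getD e.1.toNat []).set e.2.toNat 0
        else X.getD p.1.toNat [] := by
    rw [pv_getD_set]
    by_cases hai : e.1.toNat = p.1.toNat
    · rw [if_pos ⟨hai, by omega⟩, if_pos hai]
    · rw [if_neg (fun hc => hai hc.1), if_neg hai]
  have hfini : ((X.set e.1.toNat ((X.getD e.1.toNat []).set e.2.toNat 0)).set e.2.toNat
        (((X.set e.1.toNat ((X.getD e.1.toNat []).set e.2.toNat 0)).getD e.2.toNat []).set e.1.toNat 0)).getD p.1.toNat []
      = if e.2.toNat = p.1.toNat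
        then ((X.set e.1.toNat ((X.getD e.1.toNat []).set e.2.toNat 0)).getD e.2.toNat []).set e.1.toNat 0
        else (X.set e.1.toNat ((X.getD e.1.toNat []).set e.2.toNat 0)).getD p.1.toNat [] := by
    rw [pv_getD_set]
    simp only [List.length_set]
    by_cases hbi : e.2.toNat = p.1.toNat
    · rw [if_pos ⟨hbi, by omega⟩, if_pos hbi]
    · rw [if_neg (fun hc => hbi hc.1), if_neg hbi]
  rw [hfini, hY1b, hY1i]
  by_cases hbi : e.2.toNat = p.1.toNat
  · rw [if_pos hbi]
    by_cases hab : e.1.toNat = e.2.toNat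
    · rw [if_pos hab, pv_getD_set]
      simp only [List.length_set]
      by_cases haj : e.1.toNat = p.2.toNat
      · rw [if_pos ⟨haj, by omega⟩]
        have hpe : p = e := hpe_iff.mpr ⟨by omega, by omega⟩
        rw [if_pos hpe]
      · rw [if_neg (fun hc => haj hc.1), pv_getD_set]
        rw [if_neg (fun hc => haj (by omega))]
        have hne : p ≠ e := fun h => haj (by subst h; omega)
        rw [if_neg hne]
        have h1' : e.1.toNat = p.1.toNat := by omega
        rw [h1']
    · rw [if_neg hab, pv_getD_set]
      rw [if_neg (by intro hc; omega :
            ¬(e.1.toNat = p.2.toNat ∧ e.1.toNat < (X.getD e.2.toNat []).length))]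
      have hne : p ≠ e := fun h => by subst h; omega
      rw [if_neg hne, hbi]
  · rw [if_neg hbi]
    by_cases hai : e.1.toNat = p.1.toNat
    · rw [if_pos hai, pv_getD_set]
      by_cases hbj : e.2.toNat = p.2.toNat
      · rw [if_pos ⟨hbj, by omega⟩]
        have hpe : p = e := hpe_iff.mpr ⟨by omega, by omega⟩
        rw [if_pos hpe]
      · rw [if_neg (fun hc => hbj hc.1)]
        have hne : p ≠ e := fun h => by subst h; omega
        rw [if_neg hne, hai]
    · rw [if_neg hai]
      have hne : p ≠ e := fun h => by subst h; omega
      rw [if_neg hne]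

theorem pvApplyZ_cons (X : List (List Int)) (q : Int × Int) (C : List (Int × Int)) :
    pvApplyZ X (q :: C) = pvApplyZ (pvZstep X q) C := rfl

theorem pvApplyZ_append (X : List (List Int)) (C1 C2 : List (Int × Int)) :
    pvApplyZ X (C1 ++ C2) = pvApplyZ (pvApplyZ X C1) C2 := List.foldl_append ..

theorem pvGood_applyZ {M : List (List Int)} :
    ∀ (C : List (Int × Int)) (X : List (List Int)), pvGood M X →
      (∀ q ∈ C, 0 ≤ q.1 ∧ 0 ≤ q.2) → pvGood M (pvApplyZ X C) := by
  intro C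
  induction C with
  | nil => intro X hG _; exact hG
  | cons q C ih =>
    intro X hG hC
    rw [pvApplyZ_cons]
    exact ih _ (pvGood_zstep hG q (hC q (by simp)).1 (hC q (by simp)).2)
      (fun r hr => hC r (by simp [hr]))

theorem pv_wv_applyZ {M : List (List Int)} (hrow : ∀ r ∈ M, M.length ≤ r.length) :
    ∀ (C : List (Int × Int)) (X : List (List Int)), pvGood M X →
      (∀ q ∈ C, q ∈ pvTri (M.length : Int)) → ∀ p ∈ pvTri (M.length : Int),
      pvWv (pvApplyZ X C) p = if p ∈ C then 0 else pvWv X p := by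
  intro C
  induction C with
  | nil => intro X _ _ p _; simp [pvApplyZ]
  | cons q C ih =>
    intro X hG hC p hp
    have hq := hC q (by simp)
    obtain ⟨hq1, hq2, hq3⟩ := pv_mem_tri.mp hq
    rw [pvApplyZ_cons, ih _ (pvGood_zstep hG q hq1 (by omega))
      (fun r hr => hC r (by simp [hr])) p hp]
    by_cases hpC : p ∈ C
    · simp [hpC]
    · rw [if_neg hpC, pv_wv_zstep hG hrow hq hp]
      by_cases hpq : p = q <;> simp [hpq, hpC]

theorem pvBF_cons (w : Int × Int → Int) (q : Int × Int) (L : List (Int × Int))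
    (init : Int × Int × Int) :
    pvBF w (q :: L) init = pvBF w L (if w q > init.2.2 then (q.1, q.2, w q) else init) := rfl

theorem pvBF_append (w : Int × Int → Int) (L1 L2 : List (Int × Int)) (init : Int × Int × Int) :
    pvBF w (L1 ++ L2) init = pvBF w L2 (pvBF w L1 init) := List.foldl_append ..

theorem pvBF_skip (w : Int × Int → Int) :
    ∀ (L : List (Int × Int)) (init : Int × Int × Int),
      (∀ q ∈ L, w q ≤ init.2.2) → pvBF w L init = init := by
  intro L
  induction L with
  | nil => intro init _; rfl
  | cons q L ih =>
    intro init h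
    rw [pvBF_cons, if_neg (by simp [h q (by simp)] : ¬ w q > init.2.2)]
    exact ih init (fun r hr => h r (by simp [hr]))

theorem pvBF_lt (w : Int × Int → Int) (c : Int) :
    ∀ (L : List (Int × Int)) (init : Int × Int × Int),
      init.2.2 < c → (∀ q ∈ L, w q < c) → (pvBF w L init).2.2 < c := by
  intro L
  induction L with
  | nil => intro init h _; exact h
  | cons q L ih =>
    intro init h hq
    rw [pvBF_cons]
    by_cases hc : w q > init.2.2
    · rw [if_pos hc]
      exact ih _ (hq q (by simp)) (fun r hr => hq r (by simp [hr]))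
    · rw [if_neg hc]
      exact ih _ h (fun r hr => hq r (by simp [hr]))

theorem pvBF_run (w : Int × Int → Int) (L1 L2 : List (Int × Int)) (b : Int × Int)
    (h1 : ∀ q ∈ L1, w q < w b) (hb0 : 0 < w b) (h2 : ∀ q ∈ L2, w q ≤ w b) :
    pvBF w (L1 ++ b :: L2) ((0 : Int), (0 : Int), (0 : Int)) = (b.1, b.2, w b) := by
  rw [pvBF_append]
  have hacc : (pvBF w L1 ((0 : Int), (0 : Int), (0 : Int))).2.2 < w b :=
    pvBF_lt w (w b) L1 _ (by simpa using hb0) h1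
  rw [pvBF_cons, if_pos (by exact hacc)]
  exact pvBF_skip w L2 _ (by simpa using h2)

theorem pvBF_filter (w : Int × Int → Int) :
    ∀ (L : List (Int × Int)) (init : Int × Int × Int), 0 ≤ init.2.2 →
      pvBF w L init = pvBF w (L.filter (fun q => decide (0 < w q))) init := by
  intro L
  induction L with
  | nil => intro init _; rfl
  | cons q L ih =>
    intro init h
    by_cases hq : 0 < w q
    · rw [List.filter_cons_of_pos (by simpa using hq), pvBF_cons, pvBF_cons]
      by_cases hc : w q > init.2.2
      · rw [if_pos hc]; exact ih _ (by simp; omega)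
      · rw [if_neg hc]; exact ih _ h
    · rw [List.filter_cons_of_neg (by simpa using hq), pvBF_cons,
          if_neg (by omega : ¬ w q > init.2.2)]
      exact ih _ h

theorem pv_rank_lt_of_fst {n : Int} {p q : Int × Int} (hp : p ∈ pvTri n) (hq : q ∈ pvTri n)
    (h : p.1 < q.1) : pvRank n p < pvRank n q := by
  obtain ⟨hp1, hp2, hp3⟩ := pv_mem_tri.mp hp
  obtain ⟨hq1, hq2, hq3⟩ := pv_mem_tri.mp hq
  unfold pvRank
  calc p.1 * n + p.2 < p.1 * n + n := by omega
    _ = (p.1 + 1) * n := by ring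
    _ ≤ q.1 * n := mul_le_mul_of_nonneg_right (by omega) (by omega)
    _ ≤ q.1 * n + q.2 := by omega

theorem pv_tri_pairwise (n : Int) :
    (pvTri n).Pairwise (fun p q => pvRank n p < pvRank n q) := by
  unfold pvTri
  rw [List.pairwise_flatMap]
  constructor
  · intro i _
    rw [List.pairwise_map]
    refine (PySem.List.pairwise_lt_pyRange_one (a := i) (b := n)).imp ?_
    intro a b h
    unfold pvRank
    simpa using h
  · refine (PySem.List.pairwise_lt_pyRange_one (a := 0) (b := n)).imp_of_mem ?_
    intro a b ha hb hlt x hx y hy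
    rw [List.mem_map] at hx hy
    obtain ⟨j, hj, rfl⟩ := hx
    obtain ⟨j', hj', rfl⟩ := hy
    rw [PySem.List.mem_pyRange_one] at hj hj' ha hb
    exact pv_rank_lt_of_fst (pv_mem_tri.mpr (by simp; omega))
      (pv_mem_tri.mpr (by simp; omega)) (by simpa using hlt)

theorem pv_tri_nodup (n : Int) : (pvTri n).Nodup :=
  (pv_tri_pairwise n).imp (fun h => by
    intro heq
    subst heq
    exact absurd h (lt_irrefl _))

theorem pv_key_lt {M : List (List Int)} {n : Int} (hn : n = (M.length : Int)) {p q : Int × Int}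
    (hp : p ∈ pvTri n) (hq : q ∈ pvTri n) (h : pvWv M q < pvWv M p) :
    pvKey M n p < pvKey M n q := by
  obtain ⟨hp1, hp2, hp3⟩ := pv_mem_tri.mp hp
  obtain ⟨hq1, hq2, hq3⟩ := pv_mem_tri.mp hq
  unfold pvKey
  have h1 : p.1 * n ≤ (n - 1) * n := mul_le_mul_of_nonneg_right (by omega) (by omega)
  have h2 : 0 ≤ q.1 * n := mul_nonneg (by omega) (by omega)
  have h3 : (pvWv M q - pvWv M p) * (n * n) ≤ (-1) * (n * n) :=
    mul_le_mul_of_nonneg_right (by omega) (mul_self_nonneg n)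
  nlinarith [h1, h2, h3]

theorem pv_key_rank_iff {M : List (List Int)} {n : Int} {p q : Int × Int}
    (hw : pvWv M p = pvWv M q) : pvKey M n p < pvKey M n q ↔ pvRank n p < pvRank n q := by
  unfold pvKey pvRank
  rw [hw]
  constructor <;> intro h <;> linarith

theorem pv_wv_le_of_key_lt {M : List (List Int)} {n : Int} (hn : n = (M.length : Int))
    {p q : Int × Int} (hp : p ∈ pvTri n) (hq : q ∈ pvTri n)
    (h : pvKey M n p < pvKey M n q) : pvWv M q ≤ pvWv M p := by
  by_contra hc
  rw [not_le] at hc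
  exact absurd (pv_key_lt hn hq hp hc) (by omega)

theorem pv_wv_lt_of_key_lt_rank {M : List (List Int)} {n : Int} (hn : n = (M.length : Int))
    {p q : Int × Int} (hp : p ∈ pvTri n) (hq : q ∈ pvTri n)
    (h : pvKey M n p < pvKey M n q) (hr : pvRank n q < pvRank n p) : pvWv M q < pvWv M p := by
  rcases lt_or_eq_of_le (pv_wv_le_of_key_lt hn hp hq h) with h' | h'
  · exact h'
  · exfalso
    rw [(pv_key_rank_iff h'.symm)] at h
    omega

theorem pv_key_inj {M : List (List Int)} {n : Int} (hn : n = (M.length : Int))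
    {p q : Int × Int} (hp : p ∈ pvTri n) (hq : q ∈ pvTri n)
    (h : pvKey M n p = pvKey M n q) : p = q := by
  have hw : pvWv M p = pvWv M q := by
    rcases lt_trichotomy (pvWv M p) (pvWv M q) with h' | h' | h'
    · exact absurd (pv_key_lt hn hq hp h') (by omega)
    · exact h'
    · exact absurd (pv_key_lt hn hp hq h') (by omega)
  have hr : pvRank n p = pvRank n q := by
    have h1 := (pv_key_rank_iff (M := M) (n := n) hw)
    have h2 := (pv_key_rank_iff (M := M) (n := n) hw.symm)
    omega
  obtain ⟨hp1, hp2, hp3⟩ := pv_mem_tri.mp hp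
  obtain ⟨hq1, hq2, hq3⟩ := pv_mem_tri.mp hq
  have hfst : p.1 = q.1 := by
    rcases lt_trichotomy p.1 q.1 with h' | h' | h'
    · exact absurd (pv_rank_lt_of_fst hp hq h') (by omega)
    · exact h'
    · exact absurd (pv_rank_lt_of_fst hq hp h') (by omega)
  have hsnd : p.2 = q.2 := by
    unfold pvRank at hr
    rw [hfst] at hr
    omega
  exact Prod.ext hfst hsnd

theorem pv_edges_mem {M : List (List Int)} {q : Int × Int} :
    q ∈ pvEdges M ↔ q ∈ pvTri (M.length : Int) ∧ 0 < pvWv M q := by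
  unfold pvEdges
  simp [List.mem_filter]

theorem pv_edges_nodup (M : List (List Int)) : (pvEdges M).Nodup :=
  (pv_tri_nodup _).filter _

theorem pvS_perm (M : List (List Int)) : (pvS M).Perm (pvEdges M) :=
  PySem.List.sorted_perm _ _ _

theorem pvS_nodup (M : List (List Int)) : (pvS M).Nodup :=
  ((pvS_perm M).nodup_iff).mpr (pv_edges_nodup M)

theorem pvS_mem {M : List (List Int)} {q : Int × Int} : q ∈ pvS M ↔ q ∈ pvEdges M :=
  (pvS_perm M).mem_iff

theorem pvS_pairwise (M : List (List Int)) :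
    (pvS M).Pairwise (fun a b => pvKey M (M.length : Int) a < pvKey M (M.length : Int) b) := by
  have h1 : (pvS M).Pairwise (fun a b =>
      pvKey M (M.length : Int) a ≤ pvKey M (M.length : Int) b) :=
    PySem.List.sorted_pairwise _ _
  refine (h1.and (pvS_nodup M)).imp_of_mem ?_
  intro a b ha hb hab
  rcases lt_or_eq_of_le hab.1 with h' | h'
  · exact h'
  · exact absurd (pv_key_inj rfl (pv_edges_mem.mp (pvS_mem.mp ha)).1
      (pv_edges_mem.mp (pvS_mem.mp hb)).1 h') hab.2

-- ===== VERDICT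

theorem pvBF_congr (w1 w2 : Int × Int → Int) :
    ∀ (L : List (Int × Int)) (init : Int × Int × Int),
      (∀ q ∈ L, w1 q = w2 q) → pvBF w1 L init = pvBF w2 L init := by
  intro L
  induction L with
  | nil => intro init _; rfl
  | cons q L ih =>
    intro init h
    rw [pvBF_cons, pvBF_cons, h q (by simp)]
    exact ih _ (fun r hr => h r (by simp [hr]))

theorem pvS_mem_tri {M : List (List Int)} {q : Int × Int} (h : q ∈ pvS M) :
    q ∈ pvTri (M.length : Int) := (pv_edges_mem.mp (pvS_mem.mp h)).1

theorem pv_step_take {M : List (List Int)} (hrow : ∀ r ∈ M, M.length ≤ r.length)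
    {t : Nat} (ht : t < (pvS M).length) :
    pvStep (pvApplyZ M ((pvS M).take t)) = pvApplyZ M ((pvS M).take (t + 1)) := by
  have hCmem : ∀ q ∈ (pvS M).take t, q ∈ pvTri (M.length : Int) :=
    fun q hq => pvS_mem_tri ((List.take_sublist t (pvS M)).mem hq)
  have hGX : pvGood M (pvApplyZ M ((pvS M).take t)) :=
    pvGood_applyZ _ M rfl (fun q hq => by
      obtain ⟨h1, h2, h3⟩ := pv_mem_tri.mp (hCmem q hq); exact ⟨h1, by omega⟩)
  have hXlen : (pvApplyZ M ((pvS M).take t)).length = M.length := pvGood_len hGX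
  have hb : (pvS M)[t] ∈ pvS M := List.getElem_mem ht
  have hbE : (pvS M)[t] ∈ pvEdges M := pvS_mem.mp hb
  have hbT : (pvS M)[t] ∈ pvTri (M.length : Int) := (pv_edges_mem.mp hbE).1
  have hb0 : 0 < pvWv M ((pvS M)[t]) := (pv_edges_mem.mp hbE).2
  have hbdrop : (pvS M)[t] ∈ (pvS M).drop t := by
    rw [List.drop_eq_getElem_cons ht]; exact List.mem_cons_self
  have hbC : (pvS M)[t] ∉ (pvS M).take t := by
    have hnd := pvS_nodup M
    rw [← List.take_append_drop t (pvS M)] at hnd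
    exact fun hin => (List.disjoint_of_nodup_append hnd) hin hbdrop
  have hbR : (pvS M)[t] ∈ (pvEdges M).filter (fun q => decide (q ∉ (pvS M).take t)) :=
    List.mem_filter.mpr ⟨hbE, by simpa using hbC⟩
  have hmin : ∀ q ∈ (pvEdges M).filter (fun q => decide (q ∉ (pvS M).take t)),
      q ≠ (pvS M)[t] →
      pvKey M (M.length : Int) ((pvS M)[t]) < pvKey M (M.length : Int) q := by
    intro q hqR hqb
    have hqE := (List.mem_filter.mp hqR).1
    have hqC : q ∉ (pvS M).take t := by simpa using (List.mem_filter.mp hqR).2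
    have hqS : q ∈ pvS M := pvS_mem.mpr hqE
    have hdrop : q ∈ (pvS M).drop t := by
      have hq2 : q ∈ (pvS M).take t ++ (pvS M).drop t := by
        rw [List.take_append_drop]; exact hqS
      rcases List.mem_append.mp hq2 with h | h
      · exact absurd h hqC
      · exact h
    rw [List.drop_eq_getElem_cons ht] at hdrop
    rcases List.mem_cons.mp hdrop with h | h
    · exact absurd h hqb
    · have hpw := (pvS_pairwise M).sublist (List.drop_sublist t (pvS M))
      rw [List.drop_eq_getElem_cons ht] at hpw
      exact (List.pairwise_cons.mp hpw).1 q h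
  have hscan : pvBF (pvWv (pvApplyZ M ((pvS M).take t))) (pvTri (M.length : Int))
      ((0 : Int), (0 : Int), (0 : Int))
      = (((pvS M)[t]).1, ((pvS M)[t]).2, pvWv M ((pvS M)[t])) := by
    rw [pvBF_filter _ _ _ (by simp)]
    have hfeq : (pvTri (M.length : Int)).filter
        (fun p => decide (0 < pvWv (pvApplyZ M ((pvS M).take t)) p))
        = (pvEdges M).filter (fun q => decide (q ∉ (pvS M).take t)) := by
      have h1 : (pvEdges M).filter (fun q => decide (q ∉ (pvS M).take t))
          = (pvTri (M.length : Int)).filter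
            (fun q => decide (q ∉ (pvS M).take t) && decide (0 < pvWv M q)) := by
        unfold pvEdges
        rw [List.filter_filter]
      rw [h1]
      apply List.filter_congr
      intro p hp
      rw [pv_wv_applyZ hrow _ M rfl hCmem p hp]
      by_cases hpC : p ∈ (pvS M).take t <;> simp [hpC]
    rw [hfeq]
    obtain ⟨L1, L2, hsplit⟩ := List.append_of_mem hbR
    have hwagree : ∀ q ∈ (pvEdges M).filter (fun q => decide (q ∉ (pvS M).take t)),
        pvWv (pvApplyZ M ((pvS M).take t)) q = pvWv M q := by
      intro q hq
      have hqT : q ∈ pvTri (M.length : Int) :=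
        (pv_edges_mem.mp (List.mem_filter.mp hq).1).1
      rw [pv_wv_applyZ hrow _ M rfl hCmem q hqT,
          if_neg (by simpa using (List.mem_filter.mp hq).2)]
    have hRpw : ((pvEdges M).filter (fun q => decide (q ∉ (pvS M).take t))).Pairwise
        (fun p q => pvRank (M.length : Int) p < pvRank (M.length : Int) q) :=
      (pv_tri_pairwise _).sublist (List.filter_sublist.trans List.filter_sublist)
    have hRnd : ((pvEdges M).filter (fun q => decide (q ∉ (pvS M).take t))).Nodup :=
      (pv_edges_nodup M).filter _
    rw [hsplit] at hwagree hRpw hRnd ⊢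
    rw [pvBF_congr _ (pvWv M) _ _ hwagree]
    have hbL1 : (pvS M)[t] ∉ L1 := fun hin =>
      (List.disjoint_of_nodup_append hRnd) hin List.mem_cons_self
    have hcross := (List.pairwise_append.mp hRpw).2.2
    apply pvBF_run
    · intro q hq
      have hqR : q ∈ L1 ++ (pvS M)[t] :: L2 := List.mem_append.mpr (Or.inl hq)
      have hqb : q ≠ (pvS M)[t] := fun h => hbL1 (h ▸ hq)
      have hkey := hmin q (hsplit ▸ hqR) hqb
      have hrank : pvRank (M.length : Int) q < pvRank (M.length : Int) ((pvS M)[t]) :=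
        hcross q hq _ List.mem_cons_self
      exact pv_wv_lt_of_key_lt_rank rfl hbT
        (pv_edges_mem.mp (List.mem_filter.mp (hsplit ▸ hqR)).1).1 hkey hrank
    · exact hb0
    · intro q hq
      have hqR : q ∈ L1 ++ (pvS M)[t] :: L2 := List.mem_append.mpr (Or.inr (by simp [hq]))
      by_cases hqb : q = (pvS M)[t]
      · rw [hqb]
      · exact pv_wv_le_of_key_lt rfl hbT
          (pv_edges_mem.mp (List.mem_filter.mp (hsplit ▸ hqR)).1).1
          (hmin q (hsplit ▸ hqR) hqb)
  have htake : (pvS M).take (t + 1) = (pvS M).take t ++ [(pvS M)[t]] := by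
    rw [List.take_succ, List.getElem?_eq_getElem ht]
    rfl
  unfold pvStep
  rw [hXlen, hscan, htake, pvApplyZ_append]
  rfl

theorem pv_step_exhausted {M X : List (List Int)} (hG : pvGood M X)
    (hvals : ∀ p ∈ pvTri (M.length : Int), pvWv X p ≤ 0) :
    pvStep X = pvZstep X ((0 : Int), (0 : Int)) := by
  unfold pvStep
  rw [pvGood_len hG, pvBF_skip (pvWv X) _ _ (by simpa using hvals)]

theorem pv_zstep00_id (X : List (List Int)) (h00 : pvWv X ((0 : Int), (0 : Int)) = 0) :
    pvZstep X ((0 : Int), (0 : Int)) = X := by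
  cases X with
  | nil => simp [pvZstep, PySem.List.pySetD_of_nonneg, PySem.List.pyGetD_zero]
  | cons r X' =>
    cases r with
    | nil => simp [pvZstep, PySem.List.pySetD_of_nonneg, PySem.List.pyGetD_zero_cons]
    | cons v r' =>
      have hv : v = 0 := by
        simpa [pvWv, PySem.List.pyGetD_zero_cons] using h00
      subst hv
      simp [pvZstep, PySem.List.pySetD_of_nonneg, PySem.List.pyGetD_zero_cons]

theorem pv_applyZ_S_vals {M : List (List Int)} (hrow : ∀ r ∈ M, M.length ≤ r.length) :
    ∀ p ∈ pvTri (M.length : Int), pvWv (pvApplyZ M (pvS M)) p ≤ 0 := by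
  intro p hp
  rw [pv_wv_applyZ hrow _ M rfl (fun q hq => pvS_mem_tri hq) p hp]
  by_cases hin : p ∈ pvS M
  · simp [hin]
  · rw [if_neg hin]
    by_contra hc
    exact hin (pvS_mem.mpr (pv_edges_mem.mpr ⟨hp, by omega⟩))

theorem pvGood_applyZ_S {M : List (List Int)} : pvGood M (pvApplyZ M (pvS M)) :=
  pvGood_applyZ _ M rfl (fun q hq => by
    obtain ⟨h1, h2, h3⟩ := pv_mem_tri.mp (pvS_mem_tri hq); exact ⟨h1, by omega⟩)

theorem pv_iter_closed {M : List (List Int)} (hrow : ∀ r ∈ M, M.length ≤ r.length)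
    (hn : M ≠ []) (t : Nat) :
    pvStep^[t] M = if t ≤ (pvS M).length then pvApplyZ M ((pvS M).take t)
      else pvZstep (pvApplyZ M (pvS M)) ((0 : Int), (0 : Int)) := by
  have h00T : ((0 : Int), (0 : Int)) ∈ pvTri (M.length : Int) := by
    rw [pv_mem_tri]
    have : M.length ≠ 0 := fun h => hn (List.length_eq_zero_iff.mp h)
    simp; omega
  induction t with
  | zero =>
    rw [Function.iterate_zero_apply, if_pos (Nat.zero_le _), List.take_zero]
    rfl
  | succ t ih =>
    rw [Function.iterate_succ_apply', ih]
    by_cases h1 : t < (pvS M).length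
    · rw [if_pos (show t ≤ (pvS M).length by omega),
          if_pos (show t + 1 ≤ (pvS M).length by omega)]
      exact pv_step_take hrow h1
    · by_cases h2 : t ≤ (pvS M).length
      · have ht : t = (pvS M).length := by omega
        rw [if_pos h2, if_neg (show ¬ t + 1 ≤ (pvS M).length by omega), ht, List.take_length]
        exact pv_step_exhausted pvGood_applyZ_S (pv_applyZ_S_vals hrow)
      · rw [if_neg h2, if_neg (show ¬ t + 1 ≤ (pvS M).length by omega)]
        have hG0 : pvGood M (pvZstep (pvApplyZ M (pvS M)) ((0 : Int), (0 : Int))) :=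
          pvGood_zstep pvGood_applyZ_S _ le_rfl le_rfl
        have hv0 : ∀ p ∈ pvTri (M.length : Int),
            pvWv (pvZstep (pvApplyZ M (pvS M)) ((0 : Int), (0 : Int))) p ≤ 0 := by
          intro p hp
          rw [pv_wv_zstep pvGood_applyZ_S hrow h00T hp]
          by_cases hpe : p = ((0 : Int), (0 : Int))
          · simp [hpe]
          · rw [if_neg hpe]
            exact pv_applyZ_S_vals hrow p hp
        rw [pv_step_exhausted hG0 hv0]
        apply pv_zstep00_id
        rw [pv_wv_zstep pvGood_applyZ_S hrow h00T h00T, if_pos rfl]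

theorem pv_wv00 (M : List (List Int)) :
    pvWv M ((0 : Int), (0 : Int)) = (M.getD 0 []).getD 0 0 := by
  unfold pvWv
  rw [PySem.List.pyGetD_zero, PySem.List.pyGetD_zero]

theorem pv_edges_count {M : List (List Int)} (hrow : ∀ r ∈ M, M.length ≤ r.length) :
    (pvEdges M).length = ((List.range M.length).map (fun i =>
      (((M.getD i []).take M.length).drop i).countP (fun v => decide (0 < v)))).sum := by
  unfold pvEdges pvTri
  rw [← pv_filter_flatMap, List.length_flatMap, PySem.List.pyRange_one 0 (M.length : Int)]
  simp only [Int.sub_zero, Int.toNat_natCast, List.map_map]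
  apply congrArg List.sum
  apply List.map_congr_left
  intro i hi
  rw [List.mem_range] at hi
  have hrl : M.length ≤ (M.getD i []).length := by
    rw [List.getD_eq_getElem M [] hi]
    exact hrow _ (List.getElem_mem hi)
  have hxs : ((M.getD i []).take M.length).length = M.length := by
    rw [List.length_take]; omega
  have hdrop : ((M.getD i []).take M.length).drop i
      = (PySem.List.pyRange (i : Int) (M.length : Int) 1).map
          (fun j => PySem.List.pyGetD ((M.getD i []).take M.length) j 0) := by
    rw [show ((M.length : Int)) = ((((M.getD i []).take M.length).length : Nat) : Int) by rw [hxs]]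
    rw [PySem.List.map_pyGetD_pyRange' _ _ (by omega)]
    simp
  simp only [Function.comp_def, zero_add]
  rw [← List.countP_eq_length_filter, List.countP_map, hdrop, List.countP_map]
  apply List.countP_congr
  intro j hj
  rw [PySem.List.mem_pyRange_one] at hj
  have hwv : pvWv M ((i : Int), j) = (M.getD i []).getD j.toNat 0 := by
    unfold pvWv
    rw [pv_pyGetD_getD M [] (by omega) (by omega)]
    simp only [Int.toNat_natCast]
    rw [pv_pyGetD_getD _ 0 (by omega) (by omega)]
  have hget : PySem.List.pyGetD ((M.getD i []).take M.length) j 0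
      = (M.getD i []).getD j.toNat 0 := by
    rw [pv_pyGetD_getD _ 0 (by omega) (by omega : j < ((((M.getD i []).take M.length).length : Nat) : Int))]
    rw [List.getD_eq_getElem _ _ (by omega : j.toNat < ((M.getD i []).take M.length).length),
        List.getD_eq_getElem _ _ (by omega : j.toNat < (M.getD i []).length), List.getElem_take]
  simp only [Function.comp_def, decide_eq_true_eq]
  rw [hwv, hget]

theorem pv_final (matrix : List (List Int)) (k : Int)
    (hPre : Pre_get_clusterized_matrix matrix k)
    (hnD : ¬ D_get_clusterized_matrix matrix k) :
    get_clusterized_matrix matrix k = get_clusterized_matrix_alt matrix k := by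
  rw [pv_A_eq, pv_B_eq]
  rcases hPre with hk | ⟨hM, hrow⟩
  · have h0 : (k - 1).toNat = 0 := by omega
    rw [h0]
    simp [pvApplyZ]
  · rw [pv_iter_closed hrow hM ((k - 1).toNat)]
    by_cases hle : (k - 1).toNat ≤ (pvS matrix).length
    · rw [if_pos hle]
    · rw [if_neg hle, List.take_of_length_le (by omega)]
      apply pv_zstep00_id
      have h00T : ((0 : Int), (0 : Int)) ∈ pvTri (matrix.length : Int) := by
        rw [pv_mem_tri]
        have : matrix.length ≠ 0 := fun h => hM (List.length_eq_zero_iff.mp h)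
        simp; omega
      rw [pv_wv_applyZ hrow _ matrix rfl (fun q hq => pvS_mem_tri hq) _ h00T]
      by_cases hin : ((0 : Int), (0 : Int)) ∈ pvS matrix
      · rw [if_pos hin]
      · rw [if_neg hin]
        have hlenS : (pvS matrix).length = (pvEdges matrix).length :=
          (pvS_perm matrix).length_eq
        have hE : ((pvEdges matrix).length : Int) < k - 1 := by omega
        have hE' : ((((List.range matrix.length).map (fun i =>
            (((matrix.getD i []).take matrix.length).drop i).countP
              (fun v => decide (0 < v)))).sum : Nat) : Int) < k - 1 := by
          rw [← pv_edges_count hrow]; exact hE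
        have hge : 0 ≤ pvWv matrix ((0 : Int), (0 : Int)) := by
          by_contra hc
          exact hnD ⟨hM, by rw [← pv_wv00]; omega, hE'⟩
        have hnotpos : ¬ 0 < pvWv matrix ((0 : Int), (0 : Int)) := fun hp =>
          hin (pvS_mem.mpr (pv_edges_mem.mpr ⟨h00T, hp⟩))
        omega

-- ===== VERDICT (by name: the statement is the Claim_ definition above) =====
theorem get_clusterized_matrix_spec : Claim_unchanged_get_clusterized_matrix := by
  intro matrix k _hDom hPre
  unfold Spec_get_clusterized_matrix
  intro hnD
  exact pv_final matrix k hPre hnD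
theorem get_clusterized_matrix_changed : Claim_changed_get_clusterized_matrix := by
  unfold Claim_changed_get_clusterized_matrix; decide
theorem get_clusterized_matrix_tight : Claim_exact_get_clusterized_matrix := by
  intro matrix k _hDom hPre hD
  obtain ⟨hM, h00g, hEc⟩ := hD
  have hrow : ∀ r ∈ matrix, matrix.length ≤ r.length := by
    rcases hPre with hk | ⟨_, hrow⟩
    · exfalso; omega
    · exact hrow
  have h00 : pvWv matrix ((0 : Int), (0 : Int)) < 0 := by rw [pv_wv00]; exact h00g
  have hE : ((pvEdges matrix).length : Int) < k - 1 := by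
    rw [pv_edges_count hrow]; exact hEc
  have hlenS : (pvS matrix).length = (pvEdges matrix).length := (pvS_perm matrix).length_eq
  have hgt : ¬ ((k - 1).toNat ≤ (pvS matrix).length) := by omega
  rw [pv_A_eq, pv_B_eq, pv_iter_closed hrow hM, if_neg hgt,
      List.take_of_length_le (by omega)]
  intro heq
  have h00T : ((0 : Int), (0 : Int)) ∈ pvTri (matrix.length : Int) := by
    rw [pv_mem_tri]
    have : matrix.length ≠ 0 := fun h => hM (List.length_eq_zero_iff.mp h)
    simp; omega
  have hS00 : ((0 : Int), (0 : Int)) ∉ pvS matrix := fun hin => by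
    have := (pv_edges_mem.mp (pvS_mem.mp hin)).2
    omega
  have hwB : pvWv (pvApplyZ matrix (pvS matrix)) ((0 : Int), (0 : Int))
      = pvWv matrix ((0 : Int), (0 : Int)) := by
    rw [pv_wv_applyZ hrow _ matrix rfl (fun q hq => pvS_mem_tri hq) _ h00T, if_neg hS00]
  have hwA : pvWv (pvZstep (pvApplyZ matrix (pvS matrix)) ((0 : Int), (0 : Int)))
      ((0 : Int), (0 : Int)) = 0 := by
    rw [pv_wv_zstep pvGood_applyZ_S hrow h00T h00T, if_pos rfl]
  rw [heq, hwB] at hwA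
  omega
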